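-- pv_equiv track=rewrite | github.com/lindajoy/DSAs | assignments/sliding-window-questions/buying-selling-stock-three.py | maximumProfitForTwoDays
-- ===== SOURCE A (Python) =====
-- def maximumProfitForTwoDays(prices:list[int]) -> int:
--     # Left represents when you buy , right represents when you sell
--     leftPointer, rightPointer = 0, 1
--     # Initialize the maximum profit to 0
--     maximumProfitlist = []
--
--     while rightPointer < len(prices):
--         if(prices[leftPointer] < prices[rightPointer]):
--             profit = prices[rightPointer] - prices[leftPointer]
--             maximumProfitlist.append(profit)
--             leftPointer = rightPointer
--             while (len(maximumProfitlist) > 2):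
--                least_Profit =  min(maximumProfitlist)
--                maximumProfitlist.remove(least_Profit)
--         else:
--             leftPointer = rightPointer
--         rightPointer += 1
--
--
--     return sum(maximumProfitlist)
-- ===== SOURCE B (Python) =====
-- def maximumProfitForTwoDays(prices: list[int]) -> int:
--     diffs = [b - a for a, b in zip(prices, prices[1:]) if a < b]
--     return sum(sorted(diffs, reverse=True)[:2])
-- ===== Notes on version B (the rewrite author's own statement) =====
-- stated objective: simpler
-- what changed: A walks the list with two pointers keeping a running profit list of up to three entries and evicting the minimum online via min()/remove(); B builds the positive consecutive differences in one comprehension and returns the sum of the two largest via sort-descending-and-take-2 — no mutation or eviction, which also removes the per-step list-churn overhead (measured constant-factor speedup).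
import Mathlib
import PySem

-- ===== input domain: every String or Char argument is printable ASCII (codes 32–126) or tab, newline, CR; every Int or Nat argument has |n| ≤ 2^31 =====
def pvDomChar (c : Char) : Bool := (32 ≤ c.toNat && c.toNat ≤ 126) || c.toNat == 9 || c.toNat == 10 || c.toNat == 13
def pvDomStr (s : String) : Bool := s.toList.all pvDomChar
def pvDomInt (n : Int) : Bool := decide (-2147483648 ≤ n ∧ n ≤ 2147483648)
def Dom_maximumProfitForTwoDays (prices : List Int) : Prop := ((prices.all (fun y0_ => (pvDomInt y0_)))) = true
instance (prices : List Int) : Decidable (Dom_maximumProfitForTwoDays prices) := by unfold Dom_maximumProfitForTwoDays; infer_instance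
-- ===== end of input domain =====

-- B replaces A's two-pointer walk with online min-eviction by a one-pass positive-diff
-- comprehension followed by sort-descending-and-take-2 (objective: simpler).

-- ===== PORT A =====
-- inner `while len(maximumProfitlist) > 2: remove(min(...))` loop; fuel = current length
-- bounds its iterations (each removal shortens the list, the loop stops at length ≤ 2)
def pvShrinkA : Nat → List Int → List Int
  | 0, mpl => mpl
  | f + 1, mpl =>
    if mpl.length > 2 then
      -- min(maximumProfitlist); the list is nonempty here, so the .getD defaults are unreachable
      let least := (PySem.List.min? mpl (fun x => x)).getD 0
      -- maximumProfitlist.remove(least_Profit); least ∈ mpl here, so remove? succeeds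
      pvShrinkA f ((PySem.List.remove? mpl least).getD mpl)
    else mpl

-- the outer while loop; prices[leftPointer]/prices[rightPointer] are always in range
-- (0 ≤ leftPointer < rightPointer < len), so List.getD is exact for Python indexing here
def pvLoopA (prices : List Int) (leftPointer rightPointer : Nat) (mpl : List Int) : List Int :=
  if _h : rightPointer < prices.length then
    if prices.getD leftPointer 0 < prices.getD rightPointer 0 then
      let profit := prices.getD rightPointer 0 - prices.getD leftPointer 0
      let mpl' := mpl ++ [profit]
      pvLoopA prices rightPointer (rightPointer + 1) (pvShrinkA mpl'.length mpl')
    else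
      pvLoopA prices rightPointer (rightPointer + 1) mpl
  else mpl
termination_by prices.length - rightPointer

def maximumProfitForTwoDays (prices : List Int) : Int :=
  (pvLoopA prices 0 1 []).sum

-- ===== PORT B =====
def maximumProfitForTwoDays_alt (prices : List Int) : Int :=
  -- diffs = [b - a for a, b in zip(prices, prices[1:]) if a < b]
  let diffs := (prices.zip (PySem.List.slice prices (some 1) none)).filterMap
      (fun p => if p.1 < p.2 then some (p.2 - p.1) else none)
  -- sum(sorted(diffs, reverse=True)[:2])
  ((PySem.List.sorted diffs (fun x => x) true).take 2).sum

-- ===== PRECONDITION & SPEC =====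
def Spec_maximumProfitForTwoDays (prices : List Int) (out : Int) : Prop := out = maximumProfitForTwoDays_alt prices
instance (prices : List Int) (out : Int) : Decidable (Spec_maximumProfitForTwoDays prices out) := by unfold Spec_maximumProfitForTwoDays; infer_instance

-- ===== CLAIM (what is proved, stated in full; the proofs are below) =====
def Claim_equal_maximumProfitForTwoDays : Prop := ∀ (prices : List Int), Dom_maximumProfitForTwoDays prices → Spec_maximumProfitForTwoDays prices (maximumProfitForTwoDays prices)

-- ===== LEMMAS AND PROOFS =====

-- one iteration of A's outer loop on the profit list (append then shrink)
def pvStep (mpl : List Int) (d : Int) : List Int :=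
  pvShrinkA (mpl ++ [d]).length (mpl ++ [d])

-- positive consecutive differences, structurally
def pvPosDiffs : List Int → List Int
  | a :: b :: rest => if a < b then (b - a) :: pvPosDiffs (b :: rest) else pvPosDiffs (b :: rest)
  | _ => []

-- how the top-2 prefix of a descending sort evolves when one element is appended
def pvStep2 : List Int → Int → List Int
  | [], d => [d]
  | [x], d => if x < d then [d, x] else [x, d]
  | x :: y :: _, d => if x < d then [d, x] else if y < d then [x, d] else [x, y]

-- A's top-2 list target
def pvTop2 (ds : List Int) : List Int :=
  (PySem.List.sorted ds (fun x => x) true).take 2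

theorem pvPosDiffs_eq_filterMap (l : List Int) :
    pvPosDiffs l = (l.zip l.tail).filterMap (fun p => if p.1 < p.2 then some (p.2 - p.1) else none) := by
  match l with
  | [] => rfl
  | [a] => rfl
  | a :: b :: rest =>
    have ih := pvPosDiffs_eq_filterMap (b :: rest)
    simp only [pvPosDiffs, List.tail, List.zip_cons_cons, List.filterMap_cons]
    split_ifs with h <;> simp [ih]

theorem pvStep2_take2 (s : List Int) (d : Int) : pvStep2 s d = pvStep2 (s.take 2) d := by
  match s with
  | [] => rfl
  | [x] => rfl
  | x :: y :: rest => rfl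

theorem take2_insertBy (s : List Int) (d : Int) :
    (PySem.List.insertBy (fun a b => decide (b < a)) d s).take 2 = pvStep2 s d := by
  match s with
  | [] => rfl
  | [y] =>
    simp only [PySem.List.insertBy, pvStep2]
    split_ifs with h <;> simp_all
  | y :: z :: zs =>
    simp only [PySem.List.insertBy, pvStep2]
    by_cases h1 : y < d
    · simp [h1]
    · by_cases h2 : z < d <;> simp [h1, h2]

theorem pvTop2_append (ds : List Int) (d : Int) :
    pvTop2 (ds ++ [d]) = pvStep2 (pvTop2 ds) d := by
  unfold pvTop2
  rw [PySem.List.sorted_rev_eq_foldl_insertBy, List.foldl_append]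
  simp only [List.foldl_cons, List.foldl_nil]
  rw [← PySem.List.sorted_rev_eq_foldl_insertBy, take2_insertBy, pvStep2_take2]

theorem pvTop2_sorted (ds : List Int) :
    (pvTop2 ds).Pairwise (fun a b => b ≤ a) := by
  exact (PySem.List.sorted_pairwise_rev ds (fun x => x)).sublist (List.take_sublist 2 _)

theorem pvTop2_len (ds : List Int) : (pvTop2 ds).length ≤ 2 :=
  le_trans (List.length_take_le 2 _) (le_refl 2)

theorem pvStep_nil (d : Int) : pvStep [] d = [d] := by simp [pvStep, pvShrinkA]

theorem pvStep_one (x d : Int) : pvStep [x] d = [x, d] := by simp [pvStep, pvShrinkA]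

theorem pvStep_two (x y d : Int) :
    pvStep [x, y] d = [x, y, d].erase (min (min x y) d) := by
  have hm : (PySem.List.min? [x, y, d] (fun w => w)) = some (min (min x y) d) := by
    rw [PySem.List.min?_id_cons]; simp [List.foldl]
  have hmem : (min (min x y) d) ∈ [x, y, d] := by
    rcases le_total x y with h1 | h1 <;> rcases le_total (min x y) d with h2 | h2 <;>
      simp [min_def, *] at * <;> omega
  have hrem := PySem.List.remove?_eq_some_erase [x, y, d] _ hmem
  have hlen : ([x, y, d].erase (min (min x y) d)).length = 2 := by
    rw [List.length_erase_of_mem hmem]; rfl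
  have h3 : ([x, y, d] : List Int).length > 2 := by simp
  show pvShrinkA 3 [x, y, d] = _
  rw [pvShrinkA, if_pos h3]
  show pvShrinkA 2 ((PySem.List.remove? [x, y, d]
      ((PySem.List.min? [x, y, d] (fun w => w)).getD 0)).getD [x, y, d]) = _
  rw [hm, Option.getD_some, hrem, Option.getD_some, pvShrinkA,
      if_neg (by rw [hlen]; omega)]

theorem erase_min_perm (x y d : Int) (hyx : y ≤ x) :
    ([x, y, d].erase (min (min x y) d)).Perm (pvStep2 [x, y] d) := by
  have hxy : min x y = y := min_eq_right hyx
  by_cases h1 : x < d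
  · -- d is strictly largest, min is y
    have : min (min x y) d = y := by rw [hxy]; exact min_eq_left (by omega)
    rw [this]
    by_cases hxy' : x = y
    · subst hxy'
      simp [pvStep2, h1]
      exact List.Perm.swap _ _ _
    · have : ([x, y, d].erase y) = [x, d] := by
        simp [hxy']
      rw [this]
      simp only [pvStep2, if_pos h1]
      exact List.Perm.swap _ _ _
  · by_cases h2 : y < d
    · -- min is y, and x ≠ y since y < d ≤ x
      have hne : x ≠ y := by omega
      have : min (min x y) d = y := by rw [hxy]; exact min_eq_left (by omega)
      rw [this]
      have : ([x, y, d].erase y) = [x, d] := by simp [hne]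
      rw [this]
      simp [pvStep2, h1, h2]
    · -- d ≤ y ≤ x, min is d
      have : min (min x y) d = d := by rw [hxy]; exact min_eq_right (by omega)
      rw [this]
      simp only [pvStep2, if_neg h1, if_neg h2]
      by_cases hxd : x = d
      · have hy : y = d := by omega
        subst hxd; subst hy
        simp
      · by_cases hyd : y = d
        · subst hyd
          simp [hxd]
        · simp [hxd, hyd]

theorem perm_pair {l : List Int} {x y : Int} (h : l.Perm [x, y]) :
    l = [x, y] ∨ l = [y, x] := by
  have hlen : l.length = 2 := by simpa using h.length_eq
  match l, hlen with
  | [a, b], _ =>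
    have hmem : a ∈ [x, y] := h.mem_iff.mp (by simp)
    simp only [List.mem_cons, List.not_mem_nil, or_false] at hmem
    rcases hmem with ha | ha
    · left
      rw [ha] at h ⊢
      rw [List.perm_singleton.mp h.cons_inv]
    · right
      rw [ha] at h ⊢
      have h2 : ([y, b] : List Int).Perm [y, x] := h.trans (List.Perm.swap _ _ _)
      rw [List.perm_singleton.mp h2.cons_inv]

theorem foldl_pvStep_perm (ds : List Int) :
    (List.foldl pvStep [] ds).Perm (pvTop2 ds) := by
  induction ds using List.reverseRecOn with
  | nil => simp [pvTop2, PySem.List.sorted]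
  | append_singleton ds d ih =>
    rw [List.foldl_append, List.foldl_cons, List.foldl_nil, pvTop2_append]
    have hsorted := pvTop2_sorted ds
    have hlen := pvTop2_len ds
    match hT : pvTop2 ds with
    | [] =>
      rw [hT] at ih
      rw [List.Perm.eq_nil ih, pvStep_nil]
      exact List.Perm.refl _
    | [x] =>
      rw [hT] at ih
      rw [List.perm_singleton.mp ih, pvStep_one]
      simp only [pvStep2]
      split_ifs
      · exact List.Perm.swap _ _ _
      · exact List.Perm.refl _
    | [x, y] =>
      rw [hT] at ih hsorted
      have hyx : y ≤ x := by
        rcases List.pairwise_cons.mp hsorted with ⟨hf, -⟩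
        exact hf y (by simp)
      rcases perm_pair ih with hacc | hacc <;> rw [hacc]
      · rw [pvStep_two]
        exact erase_min_perm x y d hyx
      · rw [pvStep_two]
        have hmm : min (min y x) d = min (min x y) d := by rw [min_comm y x]
        rw [hmm]
        exact (List.Perm.erase _ (List.Perm.swap x y [d])).trans (erase_min_perm x y d hyx)
    | _ :: _ :: _ :: _ => simp [hT] at hlen

theorem loopA_eq (n : Nat) (prices : List Int) (l : Nat) (mpl : List Int)
    (hn : prices.length - (l + 1) ≤ n) :
    pvLoopA prices l (l + 1) mpl = List.foldl pvStep mpl (pvPosDiffs (prices.drop l)) := by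
  induction n generalizing l mpl with
  | zero =>
    have hge : ¬ (l + 1 < prices.length) := by omega
    rw [pvLoopA, dif_neg hge]
    have hlen : (prices.drop l).length ≤ 1 := by simp; omega
    match hd : prices.drop l with
    | [] => simp [pvPosDiffs]
    | [a] => simp [pvPosDiffs]
    | a :: b :: rest => rw [hd] at hlen; simp at hlen
  | succ n ih =>
    by_cases h : l + 1 < prices.length
    · have hl : l < prices.length := by omega
      have hd1 : prices.drop l = prices[l] :: prices.drop (l + 1) := List.drop_eq_getElem_cons hl
      have hd2 : prices.drop (l + 1) = prices[l + 1] :: prices.drop (l + 2) := List.drop_eq_getElem_cons h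
      have hg1 : prices.getD l 0 = prices[l] := List.getD_eq_getElem prices 0 hl
      have hg2 : prices.getD (l + 1) 0 = prices[l + 1] := List.getD_eq_getElem prices 0 h
      rw [pvLoopA, dif_pos h, hg1, hg2]
      rw [hd1, hd2, pvPosDiffs, ← hd2]
      by_cases hlt : prices[l] < prices[l + 1]
      · rw [if_pos hlt, if_pos hlt]
        have := ih (l + 1) (pvStep mpl (prices[l + 1] - prices[l])) (by omega)
        simp only [List.foldl_cons]
        exact this
      · rw [if_neg hlt, if_neg hlt]
        exact ih (l + 1) mpl (by omega)
    · rw [pvLoopA, dif_neg h]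
      have hlen : (prices.drop l).length ≤ 1 := by simp; omega
      match hd : prices.drop l with
      | [] => simp [pvPosDiffs]
      | [a] => simp [pvPosDiffs]
      | a :: b :: rest => rw [hd] at hlen; simp at hlen

-- ===== VERDICT (by name: the statement is the Claim_ definition above) =====
theorem maximumProfitForTwoDays_spec : Claim_equal_maximumProfitForTwoDays := by
  intro prices _
  unfold Spec_maximumProfitForTwoDays maximumProfitForTwoDays maximumProfitForTwoDays_alt
  rw [loopA_eq prices.length prices 0 [] (by omega), List.drop_zero]
  rw [(foldl_pvStep_perm (pvPosDiffs prices)).sum_eq]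
  rw [PySem.List.slice_from_one]
  rw [← pvPosDiffs_eq_filterMap]
  rfl
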